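-- pv_equiv track=rewrite | github.com/geclower/Algo-Practice | July 2024/July 10th/beautifulDay.py | beautifulDays
-- ===== SOURCE A (Python) =====
-- def beautifulDays(firstDay, lastDay, k):
--     beauDays = 0
--     i = firstDay
--     while i <= lastDay:
--         numStr = str(i)
--         dayList = list(numStr)
--         dayList.reverse()
--         convertedList = map(str, dayList)
--         daySwap = ''.join(convertedList)
--
--         if (i - int(daySwap))%k == 0:
--             beauDays += 1
--
--         i += 1
--
--     return beauDays
-- ===== SOURCE B (Python) =====
-- def _countUpto(n, k):
--     # beautiful days in [0, n]
--     return sum(1 for i in range(0, n + 1) if (i - int(str(i)[::-1])) % k == 0)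
--
-- def beautifulDays(firstDay, lastDay, k):
--     if firstDay > lastDay:
--         return 0
--     return _countUpto(lastDay, k) - _countUpto(firstDay - 1, k)
-- ===== Notes on version B (the rewrite author's own statement) =====
-- stated objective: alternative
-- what changed: B counts beautiful days as a difference of two prefix counts over [0, n] (comprehension-sum with string-slice reversal) instead of A's while-loop over the window with list/map/join reversal.
import Mathlib
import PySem

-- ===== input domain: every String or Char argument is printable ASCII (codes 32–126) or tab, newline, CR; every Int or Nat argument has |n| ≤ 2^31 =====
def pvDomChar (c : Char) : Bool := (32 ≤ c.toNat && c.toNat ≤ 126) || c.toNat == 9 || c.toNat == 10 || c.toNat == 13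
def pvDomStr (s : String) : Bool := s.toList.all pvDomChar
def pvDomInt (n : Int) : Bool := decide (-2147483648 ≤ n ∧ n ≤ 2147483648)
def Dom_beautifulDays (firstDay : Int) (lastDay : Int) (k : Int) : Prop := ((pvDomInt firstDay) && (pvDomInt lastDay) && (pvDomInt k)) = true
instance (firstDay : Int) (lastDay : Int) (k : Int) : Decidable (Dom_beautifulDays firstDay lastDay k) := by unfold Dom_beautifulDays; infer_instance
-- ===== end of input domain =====

-- B replaces A's forward while-loop over [firstDay, lastDay] (reversal via list/reverse/map(str)/join)
-- by a difference of two prefix counts over [0, n] done with a comprehension sum and slice reversal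
-- str(i)[::-1]; objective: alternative decomposition, no speed claim.

-- ===== PORT A =====
-- the while loop of A: state (i, beauDays), runs while i <= lastDay
def pvBDLoop (lastDay : Int) (k : Int) (i : Int) (acc : Int) : Int :=
  if _h : i ≤ lastDay then
    let numStr := PySem.Int.toStr i
    let dayList : List Char := numStr.toList         -- list(numStr)
    let dayListRev := dayList.reverse                -- dayList.reverse()
    let convertedList : List String := dayListRev.map (fun c => String.ofList [c])  -- map(str, …): str of a 1-char string is itself
    let daySwap : String := PySem.Str.join "" convertedList
    let acc' := if PySem.Int.mod (i - (PySem.Int.ofStr? daySwap).getD 0) k = 0 then acc + 1 else acc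
    pvBDLoop lastDay k (i + 1) acc'
  else acc
termination_by (lastDay + 1 - i).toNat
decreasing_by omega

def beautifulDays (firstDay : Int) (lastDay : Int) (k : Int) : Int :=
  pvBDLoop lastDay k firstDay 0

-- ===== PORT B =====
-- sum(1 for i in range(0, n+1) if (i - int(str(i)[::-1])) % k == 0)
def pvCountUpto (n : Int) (k : Int) : Int :=
  (((PySem.List.pyRange 0 (n + 1) 1).countP (fun i =>
      decide (PySem.Int.mod (i - (PySem.Int.ofStr? ((PySem.Str.slice? (PySem.Int.toStr i) none none (-1)).getD "")).getD 0) k = 0)) : Nat) : Int)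

def beautifulDays_alt (firstDay : Int) (lastDay : Int) (k : Int) : Int :=
  if firstDay > lastDay then 0
  else pvCountUpto lastDay k - pvCountUpto (firstDay - 1) k

-- ===== PRECONDITION & SPEC =====
-- Pre_ excludes exactly the inputs where Python A raises: when the loop runs (firstDay ≤ lastDay),
-- k = 0 gives ZeroDivisionError and a negative day gives ValueError from int('…-').
def Pre_beautifulDays (firstDay : Int) (lastDay : Int) (k : Int) : Prop :=
  lastDay < firstDay ∨ (0 ≤ firstDay ∧ k ≠ 0)
instance (firstDay : Int) (lastDay : Int) (k : Int) : Decidable (Pre_beautifulDays firstDay lastDay k) := by unfold Pre_beautifulDays; infer_instance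

def pvWitness_beautifulDays : Int × Int × Int := (0, 5, 3)

def Spec_beautifulDays (firstDay : Int) (lastDay : Int) (k : Int) (out : Int) : Prop := out = beautifulDays_alt firstDay lastDay k
instance (firstDay : Int) (lastDay : Int) (k : Int) (out : Int) : Decidable (Spec_beautifulDays firstDay lastDay k out) := by unfold Spec_beautifulDays; infer_instance

-- ===== CLAIM (what is proved, stated in full; the proofs are below) =====
def Claim_equal_beautifulDays : Prop := ∀ (firstDay : Int) (lastDay : Int) (k : Int), Dom_beautifulDays firstDay lastDay k → Pre_beautifulDays firstDay lastDay k → Spec_beautifulDays firstDay lastDay k (beautifulDays firstDay lastDay k)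

-- ===== LEMMAS AND PROOFS =====

-- the Bool test B applies to a day i
def pvPred (k : Int) (i : Int) : Bool :=
  decide (PySem.Int.mod (i - (PySem.Int.ofStr? ((PySem.Str.slice? (PySem.Int.toStr i) none none (-1)).getD "")).getD 0) k = 0)

-- A's reversal pipeline builds the same string as B's slice [::-1]
lemma pvJoin_eq (s : String) :
    PySem.Str.join "" (s.toList.reverse.map (fun c => String.ofList [c])) = String.ofList s.toList.reverse := by
  apply String.toList_inj.mp
  simp [PySem.Str.join, List.map_map, Function.comp_def, String.toList_ofList]
  simpa using PySem.Chars.join_nil_singletons s.toList.reverse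

lemma pvBDLoop_eq (lastDay k : Int) (i acc : Int) :
    pvBDLoop lastDay k i acc = acc + ((PySem.List.pyRange i (lastDay + 1) 1).countP (pvPred k) : Nat) := by
  fun_induction pvBDLoop lastDay k i acc with
  | case1 i acc h numStr dayList dayListRev convertedList daySwap acc2 ih =>
      rw [ih, show PySem.List.pyRange i (lastDay + 1) 1 = i :: PySem.List.pyRange (i + 1) (lastDay + 1) 1
            from PySem.List.pyRange_one_cons (by omega), List.countP_cons]
      have hpred : pvPred k i = decide (PySem.Int.mod (i - (PySem.Int.ofStr? daySwap).getD 0) k = 0) := by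
        simp only [pvPred, daySwap, convertedList, dayListRev, dayList, numStr, pvJoin_eq,
          PySem.Str.slice?_none_none_neg_one, Option.getD_some]
      rw [hpred]
      simp only [acc2, decide_eq_true_eq]
      split_ifs with hc <;> push_cast <;> ring
  | case2 i acc h =>
      rw [PySem.List.pyRange_one_eq_nil (by omega)]
      simp

lemma pvCountUpto_eq (n k : Int) :
    pvCountUpto n k = ((PySem.List.pyRange 0 (n + 1) 1).countP (pvPred k) : Nat) := rfl

-- ===== VERDICT (by name: the statement is the Claim_ definition above) =====
theorem beautifulDays_spec : Claim_equal_beautifulDays := by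
  intro firstDay lastDay k _dom hpre
  unfold Spec_beautifulDays beautifulDays beautifulDays_alt
  rw [pvBDLoop_eq]
  by_cases hgt : firstDay > lastDay
  · rw [PySem.List.pyRange_one_eq_nil (by omega)]
    simp [hgt]
  · have hfd : 0 ≤ firstDay := by
      rcases hpre with h | h
      · omega
      · exact h.1
    rw [if_neg hgt, pvCountUpto_eq, pvCountUpto_eq]
    have hsplit := PySem.List.pyRange_one_append 0 firstDay (lastDay + 1) hfd (by omega)
    have : firstDay - 1 + 1 = firstDay := by ring
    rw [this, hsplit, List.countP_append]
    push_cast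
    ring
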